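-- pv_equiv track=rewrite | github.com/winlintun/pythonproject | number_system_converter/decimal_to_binary.py | binary_to_octal
-- ===== SOURCE A (Python) =====
-- def decimal_to_octal_converter(decimalNum:int) -> str:
--     """
--     668/8 = 83.5 -> 0.5 * 8 = 4
--     83/8 = 10.375 -> 0.375 * 8 = 3
--     10/8 = 1.25 -> 0.25 * 8 = 2
--     1/8 = 0.125 = 0.125 * 8 = 1
--
--     ans = 1234
--
--     စားလို့ရတဲ့အကြွင်းကို 8 နဲ့မြှောက်
--     """
--
--     mylist = []
--
--     while decimalNum > 0:
--         rem = decimalNum % 8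
--         mylist.append(rem)
--
--         decimalNum //= 8
--
--     octString = ''
--     while len(mylist) > 0:
--         octString += str(mylist.pop())
--
--     return octString
--
-- def binary_to_octal(binNum:int) -> int:
--     binNum = str(binNum)
--     p_cout = len(binNum)
--     mylist = []
--
--     # first we neet to convert decimal
--     for i in binNum:
--         p_cout = p_cout - 1
--         dec = int(i) * (2 ** p_cout)
--         mylist.append(dec)
--
--     decimalNum = 0
--
--     while len(mylist) > 0:
--         decimalNum = decimalNum + mylist.pop()
--
--
--     # decimal to octal
--     # function call now
--     octNumber = decimal_to_octal_converter(decimalNum)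
--     return octNumber
-- ===== SOURCE B (Python) =====
-- def binary_to_octal(binNum: int) -> str:
--     # Horner fold over the decimal string, then build the octal string back-to-front.
--     dec = 0
--     for d in str(binNum):
--         dec = dec * 2 + int(d)
--     out = ''
--     while dec > 0:
--         dec, r = divmod(dec, 8)
--         out = str(r) + out
--     return out
-- ===== Notes on version B (the rewrite author's own statement) =====
-- stated objective: simpler
-- what changed: Replaces A's power-of-two weighted list that is summed by popping, plus a two-phase octal converter (remainder list, then pop-and-concatenate), with a single doubling Horner fold over str(binNum) and one divmod loop that prepends each octal digit, building the string back to front with no intermediate lists.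
import Mathlib
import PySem

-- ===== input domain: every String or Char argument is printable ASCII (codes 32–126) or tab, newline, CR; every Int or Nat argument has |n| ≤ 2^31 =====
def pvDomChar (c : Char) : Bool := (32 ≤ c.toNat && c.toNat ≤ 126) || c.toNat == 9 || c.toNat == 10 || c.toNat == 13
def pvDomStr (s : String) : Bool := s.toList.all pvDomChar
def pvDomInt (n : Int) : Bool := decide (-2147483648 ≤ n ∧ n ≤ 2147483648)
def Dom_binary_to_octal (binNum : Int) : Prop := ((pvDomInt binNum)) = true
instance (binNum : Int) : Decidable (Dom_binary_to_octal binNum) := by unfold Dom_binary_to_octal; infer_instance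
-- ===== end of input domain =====

-- B replaces A's build-weighted-power-list-then-pop-sum and two-phase octal conversion by a single
-- Horner fold and one loop that builds the octal string back to front (objective: simpler).

-- ===== PORT A =====
-- int(i) for a one-character string; under Pre_ every character is a decimal digit, so the default is never used
def digitVal (c : Char) : Int := (PySem.Int.ofChars? [c]).getD 0

-- 'while decimalNum > 0: mylist.append(decimalNum % 8); decimalNum //= 8'
def octListA (n : Int) (acc : List Int) : List Int :=
  if h : 0 < n then octListA (PySem.Int.floordiv n 8) (acc ++ [PySem.Int.mod n 8]) else acc
termination_by n.toNat
decreasing_by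
  have : PySem.Int.floordiv n 8 = n / 8 := PySem.Int.floordiv_eq_ediv_of_pos (by omega)
  rw [this]; omega

def decimal_to_octal_converter (decimalNum : Int) : String :=
  let mylist := octListA decimalNum []
  -- 'while len(mylist) > 0: octString += str(mylist.pop())'
  mylist.reverse.foldl (fun s r => s ++ PySem.Int.toStr r) ""

def binary_to_octal (binNum : Int) : String :=
  let s := PySem.Int.toChars binNum                -- binNum = str(binNum)
  -- for i in binNum: p_cout -= 1; mylist.append(int(i) * 2 ** p_cout)
  let st := s.foldl (fun (st : Nat × List Int) i => (st.1 - 1, st.2 ++ [digitVal i * 2 ^ (st.1 - 1)]))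
              (s.length, [])
  -- 'while len(mylist) > 0: decimalNum += mylist.pop()'
  let decimalNum := st.2.reverse.foldl (· + ·) (0 : Int)
  decimal_to_octal_converter decimalNum

-- ===== PORT B =====
-- 'while dec > 0: dec, r = divmod(dec, 8); out = str(r) + out'
def octB (dec : Int) (out : String) : String :=
  if h : 0 < dec then
    let qr := (PySem.Int.divmod? dec 8).getD (0, 0)
    octB qr.1 (PySem.Int.toStr qr.2 ++ out)
  else out
termination_by dec.toNat
decreasing_by
  simp only [PySem.Int.divmod?]
  norm_num [Int.fdiv_eq_ediv]
  omega

def binary_to_octal_alt (binNum : Int) : String :=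
  let dec := (PySem.Int.toChars binNum).foldl (fun a i => a * 2 + digitVal i) 0
  octB dec ""

-- ===== PRECONDITION & SPEC =====
-- Pre_ excludes negative inputs: there str(binNum) starts with '-' and both Pythons raise ValueError at int('-').
def Pre_binary_to_octal (binNum : Int) : Prop := 0 ≤ binNum
instance (binNum : Int) : Decidable (Pre_binary_to_octal binNum) := by
  unfold Pre_binary_to_octal; infer_instance
def pvWitness_binary_to_octal : Int := (101)

def Spec_binary_to_octal (binNum : Int) (out : String) : Prop := out = binary_to_octal_alt binNum
instance (binNum : Int) (out : String) : Decidable (Spec_binary_to_octal binNum out) := by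
  unfold Spec_binary_to_octal; infer_instance

-- ===== CLAIM (what is proved, stated in full; the proofs are below) =====
def Claim_equal_binary_to_octal : Prop := ∀ (binNum : Int), Dom_binary_to_octal binNum → Pre_binary_to_octal binNum → Spec_binary_to_octal binNum (binary_to_octal binNum)

-- ===== LEMMAS AND PROOFS =====

-- the weighted digit list A builds in its first loop
def wlist : List Char → List Int
  | [] => []
  | c :: t => digitVal c * 2 ^ t.length :: wlist t

-- the remainder list A's converter builds
def octRems (n : Int) : List Int :=
  if h : 0 < n then PySem.Int.mod n 8 :: octRems (PySem.Int.floordiv n 8) else []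
termination_by n.toNat
decreasing_by
  have : PySem.Int.floordiv n 8 = n / 8 := PySem.Int.floordiv_eq_ediv_of_pos (by omega)
  rw [this]; omega

theorem octListA_eq (n : Int) (acc : List Int) : octListA n acc = acc ++ octRems n := by
  induction n, acc using octListA.induct with
  | case1 n acc h ih =>
    rw [octListA, octRems]; simp [h] at ih ⊢; simp [ih]
  | case2 n acc h =>
    rw [octListA, octRems]; simp [h]

theorem fold_weighted (cs : List Char) (acc : List Int) :
    (cs.foldl (fun (st : Nat × List Int) i => (st.1 - 1, st.2 ++ [digitVal i * 2 ^ (st.1 - 1)]))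
      (cs.length, acc)).2 = acc ++ wlist cs := by
  induction cs generalizing acc with
  | nil => simp [wlist]
  | cons c t ih =>
    simp only [List.foldl_cons, List.length_cons, Nat.add_sub_cancel, wlist]
    rw [ih]; simp

theorem horner_eq (cs : List Char) (a : Int) :
    cs.foldl (fun a i => a * 2 + digitVal i) a = a * 2 ^ cs.length + (wlist cs).sum := by
  induction cs generalizing a with
  | nil => simp [wlist]
  | cons c t ih => simp [wlist, ih, pow_succ]; ring

theorem foldl_add_rev (l : List Int) : l.reverse.foldl (· + ·) (0 : Int) = l.sum := by
  simp only [List.foldl_reverse]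
  induction l with
  | nil => simp
  | cons x t ih => simp [ih]; ring

theorem fold_str_toList (l : List Int) (s : String) :
    (l.foldl (fun s r => s ++ PySem.Int.toStr r) s).toList
      = s.toList ++ (l.map PySem.Int.toChars).flatten := by
  induction l generalizing s with
  | nil => simp
  | cons r t ih => simp [ih, PySem.Int.toList_toStr]

theorem octB_toList (n : Int) (out : String) :
    (octB n out).toList = ((octRems n).reverse.map PySem.Int.toChars).flatten ++ out.toList := by
  induction n, out using octB.induct with
  | case1 n out h qr ih =>
    rw [octB, octRems]
    simp only [h, dif_pos, PySem.Int.divmod?, PySem.Int.floordiv, PySem.Int.mod] at ih ⊢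
    norm_num at ih ⊢
    simp only [qr, PySem.Int.divmod?] at ih
    norm_num at ih
    exact ih
  | case2 n out h =>
    rw [octB, octRems]; simp [h]

-- ===== VERDICT (by name: the statement is the Claim_ definition above) =====
theorem binary_to_octal_spec : Claim_equal_binary_to_octal := by
  intro binNum _ _
  unfold Spec_binary_to_octal
  apply String.toList_inj.mp
  simp only [binary_to_octal, binary_to_octal_alt, decimal_to_octal_converter]
  rw [fold_weighted, horner_eq]
  simp only [List.nil_append, zero_mul, zero_add, foldl_add_rev, octListA_eq, List.nil_append]
  rw [fold_str_toList, octB_toList]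
  simp
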